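-- pv_equiv track=rewrite | github.com/sixscripts-ai/panther-pathfinder-aws | google_maps.py | get_building_code_by_name
-- ===== SOURCE A (Python) =====
-- BUILDING_COORDINATES = {
--     "A": {"lat": 36.67497601961465, "lng": -121.66600192296555, "name": "Hartnell College Library"},
--     "B": {"lat": 36.674594109144145, "lng": -121.66528974254899, "name": "Student Services"},
--     "C": {"lat": 36.67408990462679, "lng": -121.6658739129372, "name": "Hartnell College Bookstore"},
--     "D": {"lat": 36.67360987241185, "lng": -121.66522682209852, "name": "College Administration North"},
--     "E": {"lat": 36.673267525337444, "lng": -121.66518277607484, "name": "College Administration South"},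
--     "F": {"lat": 36.67311540426318, "lng": -121.66584630911161, "name": "Hartnell College Gymnasium"},
--     "G": {"lat": 36.673067058576976, "lng": -121.66612717101663, "name": "Hartnell College Gymnasium"},
--     "H": {"lat": 36.67294327101412, "lng": -121.66647445548287, "name": "Hartnell College Gymnasium"},
--     "J": {"lat": 36.672849972701066, "lng": -121.66766890557878, "name": "Visual Arts"},
--     "K": {"lat": 36.673321970596234, "lng": -121.66756228611722, "name": "The Western Stage"},
--     "L": {"lat": 36.67361813538571, "lng": -121.66849285041586, "name": "Maintenance, Operations and Receiving"},
--     "M": {"lat": 36.67381185515153, "lng": -121.66774543891108, "name": "Hartnell College Child Development Center"},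
--     "N": {"lat": 36.6739493219602, "lng": -121.66701075185577, "name": "Merrill Hall"},
--     "O": {"lat": 36.67288467675031, "lng": -121.66504135458179, "name": "Nursing and Health Sciences Center"},
--     "S": {"lat": 36.67341935072183, "lng": -121.6666138266549, "name": "STEM Building, Hartnell College"}
-- }
--
-- def get_building_code_by_name(building_name):
--     """
--     Find the building code for a given building name.
--
--     Args:
--         building_name (str): The building name (e.g., 'Hartnell College Library')
--
--     Returns:
--         str: Building code if name is found, None otherwise
--     """
--     building_name = building_name.strip()
--
--     # Search through all buildings to find matching name (case-insensitive)
--     for code, data in BUILDING_COORDINATES.items():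
--         if data["name"].lower() == building_name.lower():
--             return code
--
--     # If exact match not found, try partial matching
--     for code, data in BUILDING_COORDINATES.items():
--         if building_name.lower() in data["name"].lower():
--             return code
--
--     return None
-- ===== SOURCE B (Python) =====
-- BUILDING_COORDINATES = {
--     "A": {"lat": 36.67497601961465, "lng": -121.66600192296555, "name": "Hartnell College Library"},
--     "B": {"lat": 36.674594109144145, "lng": -121.66528974254899, "name": "Student Services"},
--     "C": {"lat": 36.67408990462679, "lng": -121.6658739129372, "name": "Hartnell College Bookstore"},
--     "D": {"lat": 36.67360987241185, "lng": -121.66522682209852, "name": "College Administration North"},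
--     "E": {"lat": 36.673267525337444, "lng": -121.66518277607484, "name": "College Administration South"},
--     "F": {"lat": 36.67311540426318, "lng": -121.66584630911161, "name": "Hartnell College Gymnasium"},
--     "G": {"lat": 36.673067058576976, "lng": -121.66612717101663, "name": "Hartnell College Gymnasium"},
--     "H": {"lat": 36.67294327101412, "lng": -121.66647445548287, "name": "Hartnell College Gymnasium"},
--     "J": {"lat": 36.672849972701066, "lng": -121.66766890557878, "name": "Visual Arts"},
--     "K": {"lat": 36.673321970596234, "lng": -121.66756228611722, "name": "The Western Stage"},
--     "L": {"lat": 36.67361813538571, "lng": -121.66849285041586, "name": "Maintenance, Operations and Receiving"},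
--     "M": {"lat": 36.67381185515153, "lng": -121.66774543891108, "name": "Hartnell College Child Development Center"},
--     "N": {"lat": 36.6739493219602, "lng": -121.66701075185577, "name": "Merrill Hall"},
--     "O": {"lat": 36.67288467675031, "lng": -121.66504135458179, "name": "Nursing and Health Sciences Center"},
--     "S": {"lat": 36.67341935072183, "lng": -121.6666138266549, "name": "STEM Building, Hartnell College"}
-- }
--
-- def get_building_code_by_name(building_name):
--     query = building_name.strip().lower()
--     partial = None
--     for code, data in BUILDING_COORDINATES.items():
--         name = data["name"].lower()
--         if name == query:
--             return code
--         if partial is None and query in name: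
--             partial = code
--     return partial
-- ===== Notes on version B (the rewrite author's own statement) =====
-- stated objective: simpler
-- what changed: Replaces A's two sequential scans (exact-match pass, then partial-match pass) with a single pass that lowercases the query once, returns immediately on an exact match, and remembers only the first partial match in an accumulator returned after the loop.
import Mathlib
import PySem

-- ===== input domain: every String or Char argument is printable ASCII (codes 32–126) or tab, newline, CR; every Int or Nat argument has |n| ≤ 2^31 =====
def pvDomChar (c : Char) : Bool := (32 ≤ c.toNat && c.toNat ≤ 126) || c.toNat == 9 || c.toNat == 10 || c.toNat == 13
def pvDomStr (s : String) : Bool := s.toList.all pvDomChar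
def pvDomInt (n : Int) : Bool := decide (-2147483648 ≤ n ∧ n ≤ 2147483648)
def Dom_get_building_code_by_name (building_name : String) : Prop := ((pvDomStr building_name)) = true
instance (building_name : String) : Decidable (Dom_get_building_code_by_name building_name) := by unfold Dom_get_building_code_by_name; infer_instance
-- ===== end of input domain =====

-- B replaces A's two sequential scans (exact pass, then partial pass) with ONE pass that
-- returns on an exact match and remembers the first partial match; objective: simpler.

-- the (code, name) pairs of BUILDING_COORDINATES in insertion order (lat/lng are unused)
def pvTable : List (String × String) :=
  [("A", "Hartnell College Library"),
   ("B", "Student Services"),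
   ("C", "Hartnell College Bookstore"),
   ("D", "College Administration North"),
   ("E", "College Administration South"),
   ("F", "Hartnell College Gymnasium"),
   ("G", "Hartnell College Gymnasium"),
   ("H", "Hartnell College Gymnasium"),
   ("J", "Visual Arts"),
   ("K", "The Western Stage"),
   ("L", "Maintenance, Operations and Receiving"),
   ("M", "Hartnell College Child Development Center"),
   ("N", "Merrill Hall"),
   ("O", "Nursing and Health Sciences Center"),
   ("S", "STEM Building, Hartnell College")]

-- ===== PORT A =====
-- first loop of A: return code of the first exact (case-insensitive) name match
def pvFindExact (q : String) : List (String × String) → Option String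
  | [] => none
  | (c, n) :: t =>
      if PySem.Str.lower n == PySem.Str.lower q then some c else pvFindExact q t

-- second loop of A: return code of the first name containing the query
def pvFindPartial (q : String) : List (String × String) → Option String
  | [] => none
  | (c, n) :: t =>
      if PySem.Str.isIn (PySem.Str.lower q) (PySem.Str.lower n) then some c
      else pvFindPartial q t

def get_building_code_by_name (building_name : String) : Option String :=
  let building_name := PySem.Str.strip building_name
  match pvFindExact building_name pvTable with
  | some c => some c
  | none =>
    match pvFindPartial building_name pvTable with
    | some c => some c
    | none => none

-- ===== PORT B =====
-- B's single loop: `part` is the stored first partial match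
def pvLoopB (q : String) : List (String × String) → Option String → Option String
  | [], part => part
  | (c, n) :: t, part =>
      let name := PySem.Str.lower n
      if name == q then some c
      else pvLoopB q t (if part.isNone && PySem.Str.isIn q name then some c else part)

def get_building_code_by_name_alt (building_name : String) : Option String :=
  let q := PySem.Str.lower (PySem.Str.strip building_name)
  pvLoopB q pvTable none

-- ===== PRECONDITION & SPEC =====
def Spec_get_building_code_by_name (building_name : String) (out : Option String) : Prop := out = get_building_code_by_name_alt building_name
instance (building_name : String) (out : Option String) : Decidable (Spec_get_building_code_by_name building_name out) := by unfold Spec_get_building_code_by_name; infer_instance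

-- ===== CLAIM (what is proved, stated in full; the proofs are below) =====
def Claim_equal_get_building_code_by_name : Prop := ∀ (building_name : String), Dom_get_building_code_by_name building_name → Spec_get_building_code_by_name building_name (get_building_code_by_name building_name)

-- ===== LEMMAS AND PROOFS =====

-- B's single pass computes: first exact match if any, else the stored partial, else A's partial scan
theorem pvLoopB_eq (q : String) (l : List (String × String)) (part : Option String) :
    pvLoopB (PySem.Str.lower q) l part =
      match pvFindExact q l with
      | some c => some c
      | none => part.or (pvFindPartial q l) := by
  induction l generalizing part with
  | nil => cases part <;> simp [pvLoopB, pvFindExact, pvFindPartial]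
  | cons hd t ih =>
    obtain ⟨c, n⟩ := hd
    simp only [pvLoopB, pvFindExact, pvFindPartial]
    by_cases hex : (PySem.Str.lower n == PySem.Str.lower q) = true
    · rw [if_pos hex, if_pos hex]
    · rw [if_neg hex, if_neg hex, ih]
      cases part with
      | some p => simp
      | none =>
        cases PySem.Str.isIn (PySem.Str.lower q) (PySem.Str.lower n) <;>
          cases pvFindExact q t <;> simp

theorem get_building_code_by_name_eq (building_name : String) :
    get_building_code_by_name building_name = get_building_code_by_name_alt building_name := by
  unfold get_building_code_by_name get_building_code_by_name_alt
  rw [pvLoopB_eq]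
  cases hfe : pvFindExact (PySem.Str.strip building_name) pvTable <;>
    cases hfp : pvFindPartial (PySem.Str.strip building_name) pvTable <;>
    simp [hfe, hfp]

-- ===== VERDICT (by name: the statement is the Claim_ definition above) =====
theorem get_building_code_by_name_spec : Claim_equal_get_building_code_by_name := by
  intro building_name _
  exact get_building_code_by_name_eq building_name
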